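-- pv_equiv track=rewrite | github.com/gzeric2k/hk-annual-reports-extract | scripts/extract_hk_annual_reports.py | resolve_chapter_pdf_pages
-- ===== SOURCE A (Python) =====
-- from typing import Any, Dict, List, Optional, Tuple
--
-- def resolve_chapter_pdf_pages(
--     chapters: List[Dict[str, Any]], page_map: Dict[int, int], max_pages: int
-- ) -> List[Dict[str, Any]]:
--     known = sorted((k, v) for k, v in page_map.items())
--
--     def fallback(print_page: int) -> int:
--         if not known:
--             return print_page
--         for i in range(len(known) - 1):
--             p1, pdf1 = known[i]
--             p2, pdf2 = known[i + 1]
--             if p1 <= print_page <= p2: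
--                 return max(1, min(max_pages, pdf1 + (print_page - p1)))
--         if print_page < known[0][0]:
--             p1, pdf1 = known[0]
--             return max(1, min(max_pages, pdf1 - (p1 - print_page)))
--         p_last, pdf_last = known[-1]
--         return max(1, min(max_pages, pdf_last + (print_page - p_last)))
--
--     resolved: List[Dict[str, Any]] = []
--     for ch in chapters:
--         print_page = int(ch.get("page", 0))
--         pdf_page = page_map.get(print_page, fallback(print_page))
--         item = dict(ch)
--         item["pdf_page"] = pdf_page
--         resolved.append(item)
--     return resolved
-- ===== SOURCE B (Python) =====
-- from bisect import bisect_right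
-- from typing import Any, Dict, List
--
--
-- def resolve_chapter_pdf_pages(
--     chapters: List[Dict[str, Any]], page_map: Dict[int, int], max_pages: int
-- ) -> List[Dict[str, Any]]:
--     keys = sorted(page_map)
--
--     def locate(print_page: int) -> int:
--         if print_page in page_map:
--             return page_map[print_page]
--         if not keys:
--             return print_page
--         i = bisect_right(keys, print_page)
--         p = keys[i - 1] if i > 0 else keys[0]
--         return max(1, min(max_pages, page_map[p] + (print_page - p)))
--
--     return [{**ch, "pdf_page": locate(int(ch.get("page", 0)))} for ch in chapters]
-- ===== Notes on version B (the rewrite author's own statement) =====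
-- stated objective: faster
-- what changed: B replaces A's per-chapter linear scan over consecutive (print_page, pdf_page) pairs (computed eagerly even on dict hits) by a dict membership check plus one bisect_right over the sorted key list, with a single uniform extrapolation formula covering the below/inside/above cases; it also sorts only the int keys instead of the (key, value) pairs.
import Mathlib
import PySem

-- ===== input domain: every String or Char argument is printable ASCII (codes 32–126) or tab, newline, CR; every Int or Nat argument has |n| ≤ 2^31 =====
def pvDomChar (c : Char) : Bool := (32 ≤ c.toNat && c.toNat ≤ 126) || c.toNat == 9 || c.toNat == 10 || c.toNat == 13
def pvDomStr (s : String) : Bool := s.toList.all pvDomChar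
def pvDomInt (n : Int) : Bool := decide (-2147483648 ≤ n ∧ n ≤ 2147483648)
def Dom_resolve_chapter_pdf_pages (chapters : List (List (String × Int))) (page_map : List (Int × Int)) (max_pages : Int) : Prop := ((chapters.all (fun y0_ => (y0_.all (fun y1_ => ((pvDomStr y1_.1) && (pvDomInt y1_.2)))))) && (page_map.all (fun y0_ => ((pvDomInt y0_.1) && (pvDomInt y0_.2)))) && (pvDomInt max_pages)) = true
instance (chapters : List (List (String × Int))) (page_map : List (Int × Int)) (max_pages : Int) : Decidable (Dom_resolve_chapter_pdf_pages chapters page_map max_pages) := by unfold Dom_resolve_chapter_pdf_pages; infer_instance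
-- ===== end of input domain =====

-- B replaces A's per-chapter linear scan over consecutive known pages by a dict-hit check plus one
-- bisect_right over the sorted keys, extrapolating with one uniform formula (objective: faster).


-- ===== PORT A =====
-- max(1, min(max_pages, x))
def pvClamp (max_pages x : Int) : Int := max 1 (min max_pages x)

-- A's 'for i in range(len(known) - 1): …' — scan over consecutive pairs, first hit wins
def pvScanA (max_pages pp : Int) : List (Int × Int) → Option Int
  | a :: b :: rest =>
      if a.1 ≤ pp ∧ pp ≤ b.1 then some (pvClamp max_pages (a.2 + (pp - a.1)))
      else pvScanA max_pages pp (b :: rest)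
  | _ => none

-- A's inner 'fallback'
def pvFallbackA (known : List (Int × Int)) (max_pages pp : Int) : Int :=
  match known with
  | [] => pp
  | a :: rest =>
    match pvScanA max_pages pp (a :: rest) with
    | some r => r
    | none =>
      if pp < a.1 then pvClamp max_pages (a.2 - (a.1 - pp))
      else
        let q := (a :: rest).getLast (List.cons_ne_nil a rest)
        pvClamp max_pages (q.2 + (pp - q.1))

def resolve_chapter_pdf_pages (chapters : List (List (String × Int))) (page_map : List (Int × Int)) (max_pages : Int) : List (List (String × Int)) :=
  let d := PySem.Dict.ofList page_map
  let known := PySem.List.sorted2 d.items (fun p => p.1) (fun p => p.2) false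
  chapters.foldl (fun resolved ch =>
      let chd := PySem.Dict.ofList ch
      let print_page := chd.getD "page" 0
      let pdf_page := (d.get? print_page).getD (pvFallbackA known max_pages print_page)
      resolved ++ [(chd.insert "pdf_page" pdf_page).items]) []

-- ===== PORT B =====
-- the no-dict-hit branch of B's 'locate': one bisect_right over the sorted keys,
-- one uniform extrapolation formula.  p is always a key of d, so getD's default is never used
def pvInterpB (d : PySem.Dict Int Int) (keys : List Int) (max_pages pp : Int) : Int :=
  match keys with
  | [] => pp
  | k0 :: krest =>
    let i := PySem.List.bisectRight (k0 :: krest) pp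
    let p := if 0 < i then (k0 :: krest).getD (i - 1) k0 else k0
    max 1 (min max_pages (d.getD p 0 + (pp - p)))

-- B's 'locate'
def pvLocateB (d : PySem.Dict Int Int) (keys : List Int) (max_pages pp : Int) : Int :=
  match d.get? pp with
  | some v => v
  | none => pvInterpB d keys max_pages pp

def resolve_chapter_pdf_pages_alt (chapters : List (List (String × Int))) (page_map : List (Int × Int)) (max_pages : Int) : List (List (String × Int)) :=
  let d := PySem.Dict.ofList page_map
  let keys := PySem.List.sorted d.keys (fun k => k) false
  chapters.map (fun ch =>
    let chd := PySem.Dict.ofList ch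
    (chd.insert "pdf_page" (pvLocateB d keys max_pages (chd.getD "page" 0))).items)

-- ===== PRECONDITION & SPEC =====
def Spec_resolve_chapter_pdf_pages (chapters : List (List (String × Int))) (page_map : List (Int × Int)) (max_pages : Int) (out : List (List (String × Int))) : Prop := out = resolve_chapter_pdf_pages_alt chapters page_map max_pages
instance (chapters : List (List (String × Int))) (page_map : List (Int × Int)) (max_pages : Int) (out : List (List (String × Int))) : Decidable (Spec_resolve_chapter_pdf_pages chapters page_map max_pages out) := by unfold Spec_resolve_chapter_pdf_pages; infer_instance

-- ===== CLAIM (what is proved, stated in full; the proofs are below) =====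
def Claim_equal_resolve_chapter_pdf_pages : Prop := ∀ (chapters : List (List (String × Int))) (page_map : List (Int × Int)) (max_pages : Int), Dom_resolve_chapter_pdf_pages chapters page_map max_pages → Spec_resolve_chapter_pdf_pages chapters page_map max_pages (resolve_chapter_pdf_pages chapters page_map max_pages)

-- ===== LEMMAS AND PROOFS =====

-- insertBy only compares the inserted element with elements of the list
theorem pv_insertBy_congr {α : Type} (p q : α → α → Bool) (x : α) (ys : List α)
    (h : ∀ y ∈ ys, p x y = q x y) :
    PySem.List.insertBy p x ys = PySem.List.insertBy q x ys := by
  induction ys with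
  | nil => rfl
  | cons y ys ih =>
    simp only [PySem.List.insertBy]
    rw [h y (by simp)]
    split <;> simp_all

theorem pv_foldl_insertBy_congr {α : Type} (p q : α → α → Bool) (l : List α) :
    ∀ acc : List α, (∀ a ∈ l, ∀ b ∈ acc, p a b = q a b) → (∀ a ∈ l, ∀ b ∈ l, p a b = q a b) →
    l.foldl (fun acc x => PySem.List.insertBy p x acc) acc
      = l.foldl (fun acc x => PySem.List.insertBy q x acc) acc := by
  induction l with
  | nil => intro acc _ _; rfl
  | cons x l ih =>
    intro acc hacc hl
    simp only [List.foldl_cons]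
    rw [pv_insertBy_congr p q x acc (fun y hy => hacc x (by simp) y hy)]
    exact ih _ (fun a ha b hb => by
        rcases (PySem.List.mem_insertBy _ x b acc).1 hb with rfl | hb
        · exact hl a (by simp [ha]) b (by simp)
        · exact hacc a (by simp [ha]) b hb)
      (fun a ha b hb => hl a (by simp [ha]) b (by simp [hb]))

-- with pairwise-distinct first components, Python's lexicographic pair sort is the sort by first component
theorem pv_sorted2_eq_sorted_fst (l : List (Int × Int)) (h : (l.map Prod.fst).Nodup) :
    PySem.List.sorted2 l (fun p => p.1) (fun p => p.2) false
      = PySem.List.sorted l (fun p => p.1) false := by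
  have hinj := List.inj_on_of_nodup_map h
  rw [PySem.List.sorted_eq_foldl_insertBy]
  simp only [PySem.List.sorted2]
  apply pv_foldl_insertBy_congr _ _ l [] (by simp)
  intro a ha b hb
  by_cases h1 : a.1 < b.1
  · simp [h1]
  · by_cases h2 : b.1 < a.1
    · simp [h1, h2]
    · have : a = b := hinj ha hb (le_antisymm (not_lt.1 h2) (not_lt.1 h1))
      subst this
      simp

-- if pp is below every key, A's interval scan finds nothing
theorem pv_scanA_none (max_pages pp : Int) (l : List (Int × Int))
    (h : ∀ q ∈ l, pp < q.1) : pvScanA max_pages pp l = none := by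
  induction l with
  | nil => rfl
  | cons a l ih =>
    cases l with
    | nil => rfl
    | cons b rest =>
      simp only [pvScanA]
      rw [if_neg (fun hc => absurd hc.1 (not_le.2 (h a (by simp))))]
      exact ih (fun q hq => h q (by simp [hq]))

-- core: A's fallback equals B's one-formula extrapolation from entry i-1 (or 0), for any index i
-- with the bisect_right bracketing property, on a strictly key-sorted list whose keys avoid pp
theorem pv_fallback_eq_aux (max_pages pp : Int) :
    ∀ (rest : List (Int × Int)) (a : Int × Int) (i : Nat),
      (a :: rest).Pairwise (fun x y => x.1 < y.1) →
      i ≤ (a :: rest).length →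
      (∀ j (hj : j < (a :: rest).length), j < i → (a :: rest)[j].1 < pp) →
      (∀ j (hj : j < (a :: rest).length), i ≤ j → pp < (a :: rest)[j].1) →
      pvFallbackA (a :: rest) max_pages pp
        = max 1 (min max_pages
            ((if 0 < i then (a :: rest).getD (i - 1) a else a).2
              + (pp - (if 0 < i then (a :: rest).getD (i - 1) a else a).1))) := by
  intro rest
  induction rest with
  | nil =>
    intro a i hs hile hlt hgt
    rcases i with _ | _ | n
    · -- i = 0: pp below the single known page
      have h0 : pp < a.1 := hgt 0 (by simp) (by omega)
      simp only [pvFallbackA, pvScanA]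
      rw [if_pos h0]
      simp only [if_neg (lt_irrefl 0), pvClamp]
      ring_nf
    · -- i = 1: pp above the single known page
      have h1 : a.1 < pp := hlt 0 (by simp) (by omega)
      simp only [pvFallbackA, pvScanA]
      rw [if_neg (not_lt.2 (le_of_lt h1))]
      simp [pvClamp, List.getLast]
    · simp only [List.length_cons, List.length_nil] at hile
      omega
  | cons b rest' ih =>
    intro a i hs hile hlt hgt
    have hab : a.1 < b.1 := (List.pairwise_cons.1 hs).1 b (by simp)
    rcases i with _ | _ | n
    · -- i = 0: pp below every key, the scan fails and A extrapolates below known[0]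
      have hall : ∀ q ∈ a :: b :: rest', pp < q.1 := by
        intro q hq
        obtain ⟨j, hj, rfl⟩ := List.mem_iff_getElem.1 hq
        exact hgt j hj (by omega)
      simp only [pvFallbackA]
      rw [pv_scanA_none max_pages pp _ hall]
      simp only [if_pos (hall a (by simp)), if_neg (lt_irrefl 0), pvClamp]
      ring_nf
    · -- i = 1: a.1 < pp < b.1, the first interval matches
      have h1 : a.1 < pp := hlt 0 (by simp) (by omega)
      have h2 : pp < b.1 := hgt 1 (by simp) (by omega)
      simp only [pvFallbackA, pvScanA]
      rw [if_pos ⟨le_of_lt h1, le_of_lt h2⟩]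
      simp [pvClamp]
    · -- i ≥ 2: b.1 < pp, both sides reduce to the tail b :: rest'
      have hb : b.1 < pp := hlt 1 (by simp) (by omega)
      have hn : n < (b :: rest').length := by
        simp only [List.length_cons] at hile ⊢; omega
      have hA : pvFallbackA (a :: b :: rest') max_pages pp
          = pvFallbackA (b :: rest') max_pages pp := by
        have hscan : pvScanA max_pages pp (a :: b :: rest') = pvScanA max_pages pp (b :: rest') := by
          simp only [pvScanA]
          rw [if_neg (fun hc => absurd hc.2 (not_le.2 hb))]
        simp only [pvFallbackA]
        rw [hscan]
        cases hsc : pvScanA max_pages pp (b :: rest') with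
        | some r => rfl
        | none =>
          rw [if_neg (not_lt.2 (le_of_lt (lt_trans hab hb))),
              if_neg (not_lt.2 (le_of_lt hb))]
          rw [List.getLast_cons (List.cons_ne_nil b rest')]
      have htail := ih b (n + 1) (List.pairwise_cons.1 hs).2
        (by simp only [List.length_cons] at hile ⊢; omega)
        (fun j hj hji => by
          have := hlt (j + 1) (by simpa using hj) (by omega)
          simpa using this)
        (fun j hj hij => by
          have := hgt (j + 1) (by simpa using hj) (by omega)
          simpa using this)
      rw [hA, htail]
      have e1 : (a :: b :: rest').getD (n + 1 + 1 - 1) a = (b :: rest')[n] := by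
        simp only [show n + 1 + 1 - 1 = n + 1 from rfl, List.getD_cons_succ]
        exact List.getD_eq_getElem _ _ hn
      have e2 : (b :: rest').getD (n + 1 - 1) b = (b :: rest')[n] := by
        simp only [show n + 1 - 1 = n from rfl]
        exact List.getD_eq_getElem _ _ hn
      rw [if_pos (by omega : 0 < n + 1 + 1), if_pos (by omega : 0 < n + 1), e1, e2]

-- per print page: A's get-with-fallback equals B's locate
theorem pv_page_eq (page_map : List (Int × Int)) (max_pages pp : Int) :
    ((PySem.Dict.ofList page_map).get? pp).getD
        (pvFallbackA (PySem.List.sorted2 (PySem.Dict.ofList page_map).items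
          (fun p => p.1) (fun p => p.2) false) max_pages pp)
      = pvLocateB (PySem.Dict.ofList page_map)
          (PySem.List.sorted (PySem.Dict.ofList page_map).keys (fun k => k) false)
          max_pages pp := by
  set d := PySem.Dict.ofList page_map with hd
  set known := PySem.List.sorted2 d.items (fun p => p.1) (fun p => p.2) false with hknown
  have hnd : (d.items.map Prod.fst).Nodup := PySem.Dict.nodup_keys_ofList page_map
  have hperm : known.Perm d.items := PySem.List.sorted2_perm _ _ _ _
  have hsorted : known = PySem.List.sorted d.items (fun p => p.1) false :=
    pv_sorted2_eq_sorted_fst d.items hnd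
  have hle : known.Pairwise (fun a b => a.1 ≤ b.1) := by
    rw [hsorted]; exact PySem.List.sorted_pairwise d.items (fun p => p.1)
  have hndk : (known.map Prod.fst).Nodup := (hperm.map Prod.fst).nodup_iff.2 hnd
  have hlt : known.Pairwise (fun a b => a.1 < b.1) := by
    have hne : known.Pairwise (fun a b => a.1 ≠ b.1) := List.pairwise_map.1 hndk
    exact (hle.and hne).imp (fun h => lt_of_le_of_ne h.1 h.2)
  -- B's sorted key list is exactly the first components of A's sorted pair list
  have hkeys : PySem.List.sorted d.keys (fun k => k) false = known.map Prod.fst := by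
    apply PySem.List.sorted_eq_of_perm_of_pairwise_lt
    · exact hperm.map Prod.fst
    · exact List.pairwise_map.2 hlt
  cases hg : d.get? pp with
  | some v => simp [pvLocateB, hg]
  | none =>
    have hpp : pp ∉ known.map Prod.fst := by
      intro hmem
      exact (PySem.Dict.get?_eq_none_iff_not_mem_keys d pp).1 hg
        ((hperm.map Prod.fst).mem_iff.1 hmem)
    simp only [pvLocateB, hg, Option.getD_none, hkeys]
    cases hkc : known with
    | nil => simp [pvFallbackA, pvInterpB]
    | cons a rest =>
      rw [hkc] at hlt hpp hperm
      obtain ⟨hile, hlo, hhi⟩ := PySem.List.bisectRight_spec ((a :: rest).map Prod.fst) pp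
        (List.pairwise_map.2 (hkc ▸ hle))
      have c1 : PySem.List.bisectRight ((a :: rest).map Prod.fst) pp ≤ (a :: rest).length := by
        simpa only [List.length_map] using hile
      have c2 : ∀ j (hj : j < (a :: rest).length),
          j < PySem.List.bisectRight ((a :: rest).map Prod.fst) pp → (a :: rest)[j].1 < pp := by
        intro j hj hji
        have hj' : j < ((a :: rest).map Prod.fst).length := by
          simp only [List.length_map]; exact hj
        have h1 : ((a :: rest).map Prod.fst)[j] ≤ pp := hlo j hj' hji
        have h2 : ((a :: rest).map Prod.fst)[j] ≠ pp := by
          intro he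
          exact hpp (he ▸ List.getElem_mem hj')
        simp only [List.getElem_map] at h1 h2
        exact lt_of_le_of_ne h1 h2
      have c3 : ∀ j (hj : j < (a :: rest).length),
          PySem.List.bisectRight ((a :: rest).map Prod.fst) pp ≤ j → pp < (a :: rest)[j].1 := by
        intro j hj hij
        have hj' : j < ((a :: rest).map Prod.fst).length := by
          simp only [List.length_map]; exact hj
        have := hhi j hj' hij
        simp only [List.getElem_map] at this
        exact this
      -- name the bisect index and the pair it selects
      set i := PySem.List.bisectRight ((a :: rest).map Prod.fst) pp with hi
      set q : Int × Int := if 0 < i then (a :: rest).getD (i - 1) a else a with hq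
      have hqmem : q ∈ a :: rest := by
        rcases Nat.eq_zero_or_pos i with h0 | h0
        · simp [hq, h0]
        · have hir : i - 1 < (a :: rest).length := by omega
          simp only [hq, if_pos h0, List.getD_eq_getElem _ _ hir]
          exact List.getElem_mem hir
      have hp1 : (if 0 < i then ((a :: rest).map Prod.fst).getD (i - 1) a.1 else a.1) = q.1 := by
        rcases Nat.eq_zero_or_pos i with h0 | h0
        · simp [hq, h0]
        · simp only [hq, if_pos h0]
          exact List.getD_map (a :: rest) a Prod.fst
      have hval : d.getD q.1 0 = q.2 := by
        have : (q.1, q.2) ∈ d.items := hperm.subset hqmem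
        exact PySem.Dict.getD_of_mem_items d this (PySem.Dict.nodup_keys_ofList page_map) 0
      have hrhs : pvInterpB d ((a :: rest).map Prod.fst) max_pages pp
          = max 1 (min max_pages (q.2 + (pp - q.1))) := by
        simp only [pvInterpB, List.map_cons]
        rw [show a.1 :: List.map Prod.fst rest = List.map Prod.fst (a :: rest) from rfl,
            ← hi, hp1, hval]
      rw [hrhs]
      exact pv_fallback_eq_aux max_pages pp rest a i hlt c1 c2 c3

-- A = B on every input
theorem pv_resolve_eq (chapters : List (List (String × Int))) (page_map : List (Int × Int))
    (max_pages : Int) :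
    resolve_chapter_pdf_pages chapters page_map max_pages
      = resolve_chapter_pdf_pages_alt chapters page_map max_pages := by
  simp only [resolve_chapter_pdf_pages, resolve_chapter_pdf_pages_alt]
  rw [PySem.List.foldl_append_singleton_eq_map]
  simp only [List.nil_append]
  apply List.map_congr_left
  intro ch _
  rw [pv_page_eq page_map max_pages ((PySem.Dict.ofList ch).getD "page" 0)]

-- ===== VERDICT (by name: the statement is the Claim_ definition above) =====
theorem resolve_chapter_pdf_pages_spec : Claim_equal_resolve_chapter_pdf_pages := by
  intro chapters page_map max_pages _
  unfold Spec_resolve_chapter_pdf_pages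
  exact pv_resolve_eq chapters page_map max_pages
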